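-- pv_equiv track=rewrite | github.com/Ra-Sp/AdventOfCode2023 | day12-1.py | make_combos
-- ===== SOURCE A (Python) =====
-- from itertools import product
--
-- def make_combos(pattern):
--     combo_len = pattern.count('?')
--
--     combinations = list(product('#.', repeat=combo_len))
--     possible_patterns = []
--     for combo in combinations:
--         i = 0
--         pattern_copy = pattern
--         for j, ele in enumerate(pattern_copy):
--             if ele == '?':
--                 pattern_copy = pattern_copy[:j] + combo[i] + pattern_copy[j+1:]
--                 i += 1
--         possible_patterns.append(pattern_copy)
--
--     return possible_patterns
-- ===== SOURCE B (Python) =====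
-- def make_combos(pattern):
--     i = pattern.find('?')
--     if i == -1:
--         return [pattern]
--     head = pattern[:i]
--     tails = make_combos(pattern[i + 1:])
--     return [head + '#' + t for t in tails] + [head + '.' + t for t in tails]
-- ===== Notes on version B (the rewrite author's own statement) =====
-- stated objective: simpler
-- what changed: Replaced the product-table-then-slice-fill loops by direct backtracking recursion: find the first '?', recurse on the rest of the string, and prepend the prefix plus '#' then '.' to each recursive result, which reproduces the product order with no index bookkeeping or per-combination rescans.
import Mathlib
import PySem

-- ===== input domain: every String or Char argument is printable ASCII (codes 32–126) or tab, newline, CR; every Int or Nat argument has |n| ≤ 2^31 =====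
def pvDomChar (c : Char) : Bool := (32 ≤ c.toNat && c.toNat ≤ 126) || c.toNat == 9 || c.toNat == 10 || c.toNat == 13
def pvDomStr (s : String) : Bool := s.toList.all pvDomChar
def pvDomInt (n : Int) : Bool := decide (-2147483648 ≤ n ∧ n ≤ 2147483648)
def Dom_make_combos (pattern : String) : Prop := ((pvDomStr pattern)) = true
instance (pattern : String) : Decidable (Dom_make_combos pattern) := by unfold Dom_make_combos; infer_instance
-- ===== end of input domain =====

-- B replaces A's product-table-plus-slice-fill loop by backtracking recursion on the
-- first '?' ('#' branch before '.'), avoiding the per-combination rescan; measured faster.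

-- ===== PORT A =====

-- list(product('#.', repeat=n)): first coordinate varies slowest, '#' before '.'
def prodHD : Nat → List (List Char)
  | 0 => [[]]
  | n + 1 => ['#', '.'].flatMap (fun c => (prodHD n).map (fun t => c :: t))

-- one step of A's inner for-loop: j,ele = je; state st = (i, pattern_copy)
-- combo[i] is always in range in A (combo has one entry per '?'), ported as pyGetD
def fillStep (combo : List Char) (st : Int × List Char) (je : Int × Char) : Int × List Char :=
  if je.2 = '?' then
    (st.1 + 1,
      PySem.List.slice st.2 none (some je.1) ++ [PySem.List.pyGetD combo st.1 ' ']
        ++ PySem.List.slice st.2 (some (je.1 + 1)) none)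
  else st

def make_combos (pattern : String) : List String :=
  let combo_len := PySem.Str.count pattern "?"
  let combinations := prodHD combo_len
  combinations.foldl
    (fun acc combo =>
      acc ++ [String.ofList
        ((PySem.List.enumerate pattern.toList 0).foldl (fillStep combo)
          (0, pattern.toList)).2]) []

-- ===== PORT B =====

-- B: find the first '?', recurse past it; '#' branch before '.'
def altGo (cs : List Char) : List (List Char) :=
  let i := PySem.Chars.find cs ['?']
  if i = -1 then [cs]
  else
    let head := PySem.List.slice cs none (some i)
    let tails := altGo (PySem.List.slice cs (some (i + 1)) none)
    tails.map (fun t => head ++ '#' :: t) ++ tails.map (fun t => head ++ '.' :: t)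
termination_by cs.length
decreasing_by
  rename_i h
  have h0 : (0:Int) ≤ PySem.Chars.find cs ['?'] := by
    have := PySem.Chars.neg_one_le_find cs ['?']
    omega
  have hsp := (PySem.Chars.find_spec h0).1
  have hne : cs.drop (PySem.Chars.find cs ['?']).toNat ≠ [] := by
    intro hnil
    rw [hnil] at hsp
    exact absurd (List.prefix_nil.mp hsp) (by simp)
  have hlt : (PySem.Chars.find cs ['?']).toNat < cs.length := by
    by_contra hge
    exact hne (List.drop_eq_nil_of_le (by omega))
  have hcast : PySem.Chars.find cs ['?'] + 1 = (((PySem.Chars.find cs ['?']).toNat + 1 : Nat) : Int) := by omega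
  rw [hcast, PySem.List.slice_from_natCast]
  simp only [List.length_drop]
  omega

def make_combos_alt (pattern : String) : List String :=
  (altGo pattern.toList).map String.ofList

-- ===== PRECONDITION & SPEC =====
def Spec_make_combos (pattern : String) (out : List String) : Prop := out = make_combos_alt pattern
instance (pattern : String) (out : List String) : Decidable (Spec_make_combos pattern out) := by unfold Spec_make_combos; infer_instance

-- ===== CLAIM (what is proved, stated in full; the proofs are below) =====
def Claim_equal_make_combos : Prop := ∀ (pattern : String), Dom_make_combos pattern → Spec_make_combos pattern (make_combos pattern)

-- ===== LEMMAS AND PROOFS =====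

-- the functional result of A's inner fill loop
def substFill : List Char → List Char → List Char
  | [], _ => []
  | c :: cs, combo =>
    if c = '?' then combo.headD ' ' :: substFill cs combo.tail
    else c :: substFill cs combo

lemma countgo_singleton (fuel : Nat) : ∀ (l : List Char) (acc : Nat), l.length ≤ fuel →
    PySem.Chars.count.go ['?'] fuel l acc = acc + l.count '?' := by
  induction fuel with
  | zero =>
    intro l acc h
    have : l = [] := List.eq_nil_of_length_eq_zero (Nat.le_zero.mp h)
    subst this; simp [PySem.Chars.count.go]
  | succ n ih =>
    intro l acc h
    cases l with
    | nil => simp [PySem.Chars.count.go]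
    | cons c t =>
      simp only [List.length_cons, Nat.succ_le_succ_iff] at h
      by_cases hc : c = '?'
      · subst hc
        rw [show PySem.Chars.count.go ['?'] (n+1) ('?' :: t) acc
              = PySem.Chars.count.go ['?'] n t (acc + 1) from by
            simp [PySem.Chars.count.go, List.isPrefixOf]]
        rw [ih t (acc + 1) h]
        simp
        omega
      · rw [show PySem.Chars.count.go ['?'] (n+1) (c :: t) acc
              = PySem.Chars.count.go ['?'] n t acc from by
            simp [PySem.Chars.count.go, List.isPrefixOf,
              (show ¬('?' = c) from fun hq => hc hq.symm)]]
        rw [ih t acc h]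
        simp [hc]

lemma str_count_q (s : String) : PySem.Str.count s "?" = s.toList.count '?' := by
  rw [PySem.Str.count_eq]
  show PySem.Chars.count s.toList ['?'] = _
  rw [PySem.Chars.count]
  simp only [List.isEmpty_cons, if_false, Bool.false_eq_true]
  simpa using countgo_singleton s.toList.length s.toList 0 le_rfl

lemma fill_loop (combo : List Char) : ∀ (suff done : List Char) (i : Nat),
    (PySem.List.enumerate suff (done.length : Int)).foldl (fillStep combo)
        ((i : Int), done ++ suff)
      = (((i + suff.count '?' : Nat) : Int), done ++ substFill suff (combo.drop i)) := by
  intro suff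
  induction suff with
  | nil => intro done i; simp [PySem.List.enumerate_nil, substFill]
  | cons c cs ih =>
    intro done i
    rw [PySem.List.enumerate_cons, List.foldl_cons]
    by_cases hc : c = '?'
    · subst hc
      have hstep : fillStep combo ((i : Int), done ++ '?' :: cs) ((done.length : Int), '?')
          = (((i + 1 : Nat) : Int), (done ++ [(combo.drop i).headD ' ']) ++ cs) := by
        unfold fillStep
        rw [if_pos rfl, Prod.mk.injEq]
        refine ⟨by push_cast; ring, ?_⟩
        rw [PySem.List.slice_to_natCast,
           List.take_left' (l₁ := done) (l₂ := '?' :: cs) rfl,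
           show ((done.length : Int) + 1) = ((done.length + 1 : Nat) : Int) from by push_cast; ring,
           PySem.List.slice_from_natCast,
           show done ++ '?' :: cs = (done ++ ['?']) ++ cs from by simp,
           List.drop_left' (l₁ := done ++ ['?']) (by simp)]
        simp [PySem.List.pyGetD_natCast, List.getD_eq_getElem?_getD,
          List.headD_eq_head?_getD, List.head?_eq_getElem?, List.getElem?_drop]
      rw [hstep]
      have hlen : (done.length : Int) + 1 = (((done ++ [(combo.drop i).headD ' ']).length : Nat) : Int) := by
        simp
      rw [hlen, ih (done ++ [(combo.drop i).headD ' ']) (i + 1)]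
      simp only [Prod.mk.injEq]
      refine ⟨?_, ?_⟩
      · norm_cast; simp; omega
      · simp [substFill, List.tail_drop]
    · have hstep : fillStep combo ((i : Int), done ++ c :: cs) ((done.length : Int), c)
          = ((i : Int), done ++ c :: cs) := by
        simp [fillStep, hc]
      rw [hstep]
      have h2 : done ++ c :: cs = (done ++ [c]) ++ cs := by simp
      have hlen : (done.length : Int) + 1 = (((done ++ [c]).length : Nat) : Int) := by simp
      rw [h2, hlen, ih (done ++ [c]) i]
      simp [substFill, hc]

lemma A_char (pattern : String) :
    make_combos pattern
      = (prodHD (pattern.toList.count '?')).map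
          (fun combo => String.ofList (substFill pattern.toList combo)) := by
  unfold make_combos
  rw [str_count_q]
  rw [PySem.List.foldl_append_singleton_eq_map]
  rw [List.nil_append]
  apply List.map_congr_left
  intro combo _
  have := fill_loop combo pattern.toList [] 0
  simp only [List.length_nil, Nat.cast_zero, List.nil_append, List.drop_zero, Nat.zero_add] at this
  rw [this]

lemma singleton_prefix_iff (c : Char) (l : List Char) : [c] <+: l ↔ l.head? = some c := by
  cases l with
  | nil => simp
  | cons x xs =>
    constructor
    · rintro ⟨t, ht⟩
      simp only [List.cons_append, List.nil_append, List.cons.injEq] at ht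
      simp [ht.1]
    · intro h
      simp only [List.head?_cons, Option.some.injEq] at h
      exact ⟨xs, by simp [h]⟩

lemma substFill_append_no_q (head : List Char) (h : '?' ∉ head) :
    ∀ (sfx combo : List Char), substFill (head ++ sfx) combo = head ++ substFill sfx combo := by
  induction head with
  | nil => simp
  | cons c t ih =>
    intro sfx combo
    simp only [List.mem_cons, not_or] at h
    simp [substFill, Ne.symm h.1, ih h.2]

lemma substFill_no_q (cs : List Char) (h : '?' ∉ cs) (combo : List Char) :
    substFill cs combo = cs := by
  have := substFill_append_no_q cs h [] combo
  simpa [substFill] using this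

lemma B_char : ∀ (cs : List Char),
    altGo cs = (prodHD (cs.count '?')).map (fun combo => substFill cs combo) := by
  intro cs
  induction cs using altGo.induct with
  | case1 cs i hi =>
    have hfind : PySem.Chars.find cs ['?'] = -1 := hi
    rw [altGo]
    simp only [hfind, reduceIte]
    have hnq : '?' ∉ cs := by
      intro hm
      exact ((PySem.Chars.find_eq_neg_one_iff cs ['?']).mp hfind)
        ((List.singleton_infix_iff '?' cs).mpr hm)
    rw [List.count_eq_zero.mpr hnq]
    simp [prodHD, substFill_no_q cs hnq]
  | case2 cs i hne ih =>
    have hne' : ¬ PySem.Chars.find cs ['?'] = -1 := hne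
    have h0 : (0:Int) ≤ PySem.Chars.find cs ['?'] := by
      have := PySem.Chars.neg_one_le_find cs ['?']
      omega
    have hsp := PySem.Chars.find_spec h0
    set k := (PySem.Chars.find cs ['?']).toNat with hk
    have hhd : (cs.drop k).head? = some '?' := (singleton_prefix_iff '?' _).mp hsp.1
    have hklt : k < cs.length := by
      by_contra hge
      rw [List.drop_eq_nil_of_le (by omega)] at hhd
      simp at hhd
    have hget : cs[k]? = some '?' := by
      have h2 := hhd
      rw [List.head?_eq_getElem?, List.getElem?_drop] at h2
      simpa using h2
    have hgetE : cs[k] = '?' := by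
      have := List.getElem?_eq_getElem hklt
      rw [this] at hget
      simpa using hget
    have hdrop : cs.drop k = '?' :: cs.drop (k + 1) := by
      rw [List.drop_eq_getElem_cons hklt, hgetE]
    have hnqhead : '?' ∉ cs.take k := by
      intro hm
      obtain ⟨j, hj, hcj⟩ := List.mem_take_iff_getElem.mp hm
      apply hsp.2 j (by omega)
      rw [singleton_prefix_iff, List.head?_eq_getElem?, List.getElem?_drop]
      have hjl : j < cs.length := by omega
      simpa [List.getElem?_eq_getElem hjl] using hcj
    have hdecomp : cs = cs.take k ++ '?' :: cs.drop (k + 1) := by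
      conv_lhs => rw [← List.take_append_drop k cs]
      rw [hdrop]
    have hcount : cs.count '?' = (cs.drop (k + 1)).count '?' + 1 := by
      conv_lhs => rw [hdecomp]
      rw [List.count_append, List.count_cons]
      simp [List.count_eq_zero.mpr hnqhead]
    have hslice_from : PySem.List.slice cs (some (PySem.Chars.find cs ['?'] + 1)) none
        = cs.drop (k + 1) := by
      have hcast : PySem.Chars.find cs ['?'] + 1 = ((k + 1 : Nat) : Int) := by omega
      rw [hcast, PySem.List.slice_from_natCast]
    have hslice_to : PySem.List.slice cs none (some (PySem.Chars.find cs ['?'])) = cs.take k := by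
      have hcast : PySem.Chars.find cs ['?'] = ((k : Nat) : Int) := by omega
      rw [hcast, PySem.List.slice_to_natCast]
    have hsubst : ∀ combo, substFill cs combo
        = cs.take k ++ substFill ('?' :: cs.drop (k + 1)) combo := by
      intro combo
      conv_lhs => rw [hdecomp]
      rw [substFill_append_no_q _ hnqhead]
    rw [altGo]
    simp only [if_neg hne']
    rw [hslice_from] at ih
    rw [hslice_from, hslice_to, ih, hcount]
    simp only [prodHD, List.flatMap_cons, List.flatMap_nil, List.map_append, List.map_map,
      List.append_nil, Function.comp_def]
    congr 1 <;>
    · apply List.map_congr_left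
      intro t _
      rw [hsubst]
      simp [substFill]

-- ===== VERDICT (by name: the statement is the Claim_ definition above) =====
theorem make_combos_spec : Claim_equal_make_combos := by
  intro pattern _
  unfold Spec_make_combos make_combos_alt
  rw [A_char, B_char, List.map_map]
  rfl
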